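-- pv_equiv track=rewrite | github.com/ahjun001/project_automatic_pkg_requests | p3_select_specific_fields.py | prod_n_to_barcode
-- ===== SOURCE A (Python) =====
-- def prod_n_to_barcode(prod_nr):
--     temp_s = ''
--     for char in prod_nr:
--         if char.isnumeric():
--             temp_s += char
--     while len(temp_s) < 12:
--         temp_s = '3' + temp_s if (12 - len(temp_s)) % 2 == 1 else '0' + temp_s
--     return temp_s
-- ===== SOURCE B (Python) =====
-- def prod_n_to_barcode(prod_nr):
--     digits = ''.join(c for c in prod_nr if c.isnumeric())
--     return '303030303030'[:max(0, 12 - len(digits))] + digits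
-- ===== Notes on version B (the rewrite author's own statement) =====
-- stated objective: simpler
-- what changed: Replaces the mutating while-loop with its parity branch by a closed-form pad: prepend the appropriate prefix (length max(0, 12 - len(digits))) of a constant 12-character alternating 3/0 template to the filtered digit string.
import Mathlib
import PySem

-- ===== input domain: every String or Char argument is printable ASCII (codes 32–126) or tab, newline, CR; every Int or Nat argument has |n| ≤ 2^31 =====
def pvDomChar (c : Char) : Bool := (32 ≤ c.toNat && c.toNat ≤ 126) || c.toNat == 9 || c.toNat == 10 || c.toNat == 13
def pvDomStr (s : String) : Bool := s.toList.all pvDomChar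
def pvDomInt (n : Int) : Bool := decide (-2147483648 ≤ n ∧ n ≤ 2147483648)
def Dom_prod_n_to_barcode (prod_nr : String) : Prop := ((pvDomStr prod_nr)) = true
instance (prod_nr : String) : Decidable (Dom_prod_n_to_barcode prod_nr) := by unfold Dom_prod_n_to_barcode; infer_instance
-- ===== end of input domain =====

-- B replaces A's padding while-loop (parity branch, repeated prepends) by a closed-form
-- prefix of a constant 12-character alternating 3/0 template; objective: simpler.

-- ===== PORT A =====
-- the while-loop: each iteration prepends '3' or '0' depending on the parity of 12 - len
def pvPadA (s : List Char) : List Char :=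
  if s.length < 12 then
    pvPadA ((if (12 - s.length) % 2 == 1 then '3' else '0') :: s)
  else s
termination_by 12 - s.length

def prod_n_to_barcode (prod_nr : String) : String :=
  -- temp_s accumulation: char.isnumeric on the printable-ASCII domain is exactly isdigit
  let temp_s := prod_nr.toList.foldl (fun acc c => if PySem.Chars.isdigit c then acc ++ [c] else acc) []
  String.ofList (pvPadA temp_s)

-- ===== PORT B =====
def prod_n_to_barcode_alt (prod_nr : String) : String :=
  let digits := prod_nr.toList.filter PySem.Chars.isdigit
  -- '303030303030'[:max(0, 12 - len(digits))]: Nat subtraction is exactly max(0, ...)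
  String.ofList (("303030303030".toList.take (12 - digits.length)) ++ digits)

-- ===== PRECONDITION & SPEC =====
def Spec_prod_n_to_barcode (prod_nr : String) (out : String) : Prop := out = prod_n_to_barcode_alt prod_nr
instance (prod_nr : String) (out : String) : Decidable (Spec_prod_n_to_barcode prod_nr out) := by unfold Spec_prod_n_to_barcode; infer_instance

-- ===== CLAIM (what is proved, stated in full; the proofs are below) =====
def Claim_equal_prod_n_to_barcode : Prop := ∀ (prod_nr : String), Dom_prod_n_to_barcode prod_nr → Spec_prod_n_to_barcode prod_nr (prod_n_to_barcode prod_nr)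

-- ===== LEMMAS AND PROOFS =====

lemma pvTempl_take_step (k : Nat) (hk : k < 12) :
    "303030303030".toList.take (k+1)
      = "303030303030".toList.take k ++ [if (k+1) % 2 == 1 then '3' else '0'] := by
  interval_cases k <;> decide

lemma pvPadA_eq : ∀ (k : Nat) (s : List Char), 12 - s.length = k →
    pvPadA s = "303030303030".toList.take k ++ s := by
  intro k
  induction k with
  | zero =>
    intro s hs
    rw [pvPadA, if_neg (by omega)]
    simp
  | succ k ih =>
    intro s hs
    have hlen : s.length < 12 := by omega
    rw [pvPadA, if_pos hlen,
        ih ((if (12 - s.length) % 2 == 1 then '3' else '0') :: s) (by simp; omega),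
        hs, pvTempl_take_step k (by omega)]
    simp

lemma pvPadA_closed (s : List Char) :
    pvPadA s = "303030303030".toList.take (12 - s.length) ++ s :=
  pvPadA_eq _ s rfl

lemma foldl_filter (l : List Char) :
    l.foldl (fun acc c => if PySem.Chars.isdigit c then acc ++ [c] else acc) [] =
      l.filter PySem.Chars.isdigit := by
  simpa using PySem.List.foldl_append_if_eq_filter (p := PySem.Chars.isdigit) (l := l) (acc := [])

-- ===== VERDICT (by name: the statement is the Claim_ definition above) =====
theorem prod_n_to_barcode_spec : Claim_equal_prod_n_to_barcode := by
  intro s _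
  simp only [Spec_prod_n_to_barcode, prod_n_to_barcode, prod_n_to_barcode_alt,
    foldl_filter, pvPadA_closed]
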